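-- pv_equiv track=rewrite | github.com/davidskeck/advent-of-code | AOC_2021/14.py | apply_rule
-- ===== SOURCE A (Python) =====
-- def apply_rule(start, rule):
--     pattern, insert = rule.split("->")
--     pattern_index = start.find(pattern.strip())
--     result = []
--     while pattern_index != -1:
--         result.append((insert.strip(), pattern_index))
--         pattern_index = start.find(pattern.strip(), pattern_index + 1)
--
--     return result
-- ===== SOURCE B (Python) =====
-- def apply_rule(start, rule):
--     pattern, insert = rule.split("->")
--     pat = pattern.strip()
--     ins = insert.strip()
--     return [(ins, i) for i in range(len(start) - len(pat) + 1)
--             if start[i:i + len(pat)] == pat]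
-- ===== Notes on version B (the rewrite author's own statement) =====
-- stated objective: alternative
-- what changed: Replaces A's repeated str.find jumping search (while find != -1, re-search from last index + 1) by a single sliding-window comprehension that compares the slice start[i:i+len(pat)] against the pattern at every position i; Pre_ excludes rules without exactly one '->', on which A's tuple unpacking raises ValueError (B raises there too).
import Mathlib
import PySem

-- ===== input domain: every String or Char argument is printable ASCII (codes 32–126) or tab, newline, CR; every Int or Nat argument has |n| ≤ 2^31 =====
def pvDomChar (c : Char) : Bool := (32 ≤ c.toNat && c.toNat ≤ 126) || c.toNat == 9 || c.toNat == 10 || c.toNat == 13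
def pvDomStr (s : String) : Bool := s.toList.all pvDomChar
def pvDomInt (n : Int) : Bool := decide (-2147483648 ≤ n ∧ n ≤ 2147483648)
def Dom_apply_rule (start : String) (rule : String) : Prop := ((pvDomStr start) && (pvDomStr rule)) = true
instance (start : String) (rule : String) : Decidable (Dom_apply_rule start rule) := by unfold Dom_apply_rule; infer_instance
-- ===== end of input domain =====

-- B replaces A's repeated str.find jumping scan by a single sliding-window pass
-- comparing a slice at every position (alternative decomposition, same result).

-- ===== PORT A =====
-- the while loop of A; fuel only makes the recursion total (start index grows each step)
def applyRuleLoop (start pat ins : String) : Nat → Int → List (String × Int)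
  | 0, _ => []
  | fuel + 1, idx =>
    if idx = -1 then []
    else (ins, idx) :: applyRuleLoop start pat ins fuel (PySem.Str.findFrom start pat (idx + 1))

def apply_rule (start : String) (rule : String) : List (String × Int) :=
  match PySem.Str.split? rule "->" with
  | some [pattern, insert] =>
      applyRuleLoop start (PySem.Str.strip pattern) (PySem.Str.strip insert)
        (start.toList.length + 2)
        (PySem.Str.find start (PySem.Str.strip pattern))
  | _ => []  -- ValueError (tuple unpacking); excluded by Pre_apply_rule

-- ===== PORT B =====
def apply_rule_alt (start : String) (rule : String) : List (String × Int) :=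
  let parts := (PySem.Str.split? rule "->").getD []
  if parts.length = 2 then
    let pat := PySem.Str.strip parts[0]!
    let ins := PySem.Str.strip parts[1]!
    (PySem.List.pyRange 0 (PySem.Str.len start - PySem.Str.len pat + 1) 1).foldl
      (fun acc i =>
        if PySem.Str.slice start (some i) (some (i + PySem.Str.len pat)) == pat
        then acc ++ [(ins, i)] else acc) []
  else []  -- ValueError (tuple unpacking); excluded by Pre_apply_rule

-- ===== PRECONDITION & SPEC =====
-- A raises ValueError unless rule.split("->") has exactly two parts (exactly one "->" in rule).
def Pre_apply_rule (start : String) (rule : String) : Prop :=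
  ((PySem.Str.split? rule "->").getD []).length = 2
instance (start : String) (rule : String) : Decidable (Pre_apply_rule start rule) := by
  unfold Pre_apply_rule; infer_instance

def pvWitness_apply_rule : String × String := ("ABABAB", "AB -> C")

def Spec_apply_rule (start : String) (rule : String) (out : List (String × Int)) : Prop := out = apply_rule_alt start rule
instance (start : String) (rule : String) (out : List (String × Int)) : Decidable (Spec_apply_rule start rule out) := by unfold Spec_apply_rule; infer_instance

-- ===== CLAIM (what is proved, stated in full; the proofs are below) =====
def Claim_equal_apply_rule : Prop := ∀ (start : String) (rule : String), Dom_apply_rule start rule → Pre_apply_rule start rule → Spec_apply_rule start rule (apply_rule start rule)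

-- ===== LEMMAS AND PROOFS =====

theorem pv_findFrom_past (s sub : List Char) (k : Nat) (h : s.length < k) :
    PySem.Chars.findFrom s sub (k : Int) = -1 := by
  simp only [PySem.Chars.findFrom]
  have h1 : ¬ ((k : Int) < 0) := by omega
  have h2 : ((s.length : Int) < (k : Int)) := by exact_mod_cast h
  simp [h1, h2]

theorem pv_infix_drop_iff (s p : List Char) (k : Nat) :
    p <:+: s.drop k ↔ ∃ j, k ≤ j ∧ p <+: s.drop j := by
  constructor
  · intro h
    rcases List.infix_iff_prefix_suffix.mp h with ⟨t, hpt, hts⟩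
    have hd : t = (s.drop k).drop ((s.drop k).length - t.length) :=
      List.suffix_iff_eq_drop.mp hts
    rw [List.drop_drop] at hd
    refine ⟨k + ((s.drop k).length - t.length), by omega, ?_⟩
    rw [← hd]; exact hpt
  · rintro ⟨j, hkj, hp⟩
    refine List.infix_iff_prefix_suffix.mpr ⟨s.drop j, hp, ?_⟩
    rw [show s.drop j = (s.drop k).drop (j - k) by rw [List.drop_drop]; congr 1; omega]
    exact List.drop_suffix _ _

theorem pv_good_lt (s p : List Char) (j : Nat) (hj : j ≤ s.length)
    (h : p <+: s.drop j) : j < s.length + 1 - p.length := by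
  have := h.length_le
  simp [List.length_drop] at this
  omega

-- A's loop from search position k produces exactly the matches at indices ≥ k
theorem pv_loop_eq (start pat ins : String) (fuel k : Nat)
    (hk : k ≤ start.toList.length + 1)
    (hf : start.toList.length + 2 - k ≤ fuel) :
    applyRuleLoop start pat ins fuel (PySem.Chars.findFrom start.toList pat.toList (k : Int)) =
      ((List.range' k (start.toList.length + 1 - pat.toList.length - k)).filter
          (fun j => decide (pat.toList <+: start.toList.drop j))).map
        (fun j => (ins, (j : Int))) := by
  induction fuel generalizing k with
  | zero => omega
  | succ fuel ih =>
    set s := start.toList with hs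
    set p := pat.toList with hp
    set M := s.length + 1 - p.length with hM
    by_cases hklen : s.length < k
    · -- k = s.length + 1 : past the end, find returns -1 and the range is empty
      rw [pv_findFrom_past s p k hklen]
      have : M - k = 0 := by omega
      simp [applyRuleLoop, this]
    · replace hklen : k ≤ s.length := Nat.le_of_not_lt hklen
      by_cases hneg : PySem.Chars.findFrom s p (k : Int) = -1
      · rw [hneg]
        have hnoinf := (PySem.Chars.findFrom_natCast_eq_neg_one_iff s p k hklen).mp hneg
        have hnone : ∀ j ∈ List.range' k (M - k), ¬ p <+: s.drop j := by
          intro j hj hpre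
          exact hnoinf ((pv_infix_drop_iff s p k).mpr ⟨j, (List.mem_range'_1.mp hj).1, hpre⟩)
        have hfil : (List.range' k (M - k)).filter (fun j => decide (p <+: s.drop j)) = [] := by
          rw [List.filter_eq_nil_iff]
          intro j hj
          simpa using hnone j hj
        simp [applyRuleLoop, hfil]
      · obtain ⟨hge, hpre, hmin⟩ := PySem.Chars.findFrom_natCast_spec s p k hklen hneg
        set f := PySem.Chars.findFrom s p (k : Int) with hfdef
        have hf0 : 0 ≤ f := le_trans (by omega) hge
        have hfle : f ≤ (s.length : Int) := by
          rw [hfdef, PySem.Chars.findFrom_natCast s p k hklen]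
          have h2 := PySem.Chars.find_le_length (s.drop k) p
          rw [List.length_drop] at h2
          split_ifs with h3
          · omega
          · omega
        set j0 := f.toNat with hj0
        have hfj0 : f = (j0 : Int) := (Int.toNat_of_nonneg hf0).symm
        have hkj0 : k ≤ j0 := by omega
        have hj0len : j0 ≤ s.length := by omega
        have hj0M : j0 < M := pv_good_lt s p j0 hj0len hpre
        -- unfold one loop step
        have hstep : applyRuleLoop start pat ins (fuel + 1) f =
            (ins, f) :: applyRuleLoop start pat ins fuel
              (PySem.Chars.findFrom s p (f + 1)) := by
          rw [show applyRuleLoop start pat ins (fuel+1) f =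
            if f = -1 then [] else (ins, f) ::
              applyRuleLoop start pat ins fuel (PySem.Str.findFrom start pat (f+1)) from rfl]
          rw [if_neg hneg, PySem.Str.findFrom_eq]
        have hcast : f + 1 = ((j0 + 1 : Nat) : Int) := by omega
        have hrec := ih (j0 + 1) (by omega) (by omega)
        -- split the range at j0
        have hsplit : List.range' k (M - k) =
            List.range' k (j0 - k) ++ j0 :: List.range' (j0 + 1) (M - (j0 + 1)) := by
          have h1 := @List.range'_append k (j0 - k) (M - j0) 1
          have h2 : k + 1 * (j0 - k) = j0 := by omega
          have h3 : (j0 - k) + (M - j0) = M - k := by omega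
          rw [h2, h3] at h1
          rw [← h1]
          congr 1
          rw [show M - j0 = (M - (j0 + 1)) + 1 by omega]
          rw [List.range'_succ]
        have hfil1 : (List.range' k (j0 - k)).filter (fun j => decide (p <+: s.drop j)) = [] := by
          rw [List.filter_eq_nil_iff]
          intro j hj
          rcases List.mem_range'_1.mp hj with ⟨hj1, hj2⟩
          simpa using hmin j hj1 (by omega)
        rw [hstep, hcast, hrec, hsplit, List.filter_append, hfil1]
        rw [List.filter_cons_of_pos (by simpa using hpre)]
        simp [hfj0]

theorem pv_map_cast (X : List Nat) (ins : String) :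
    List.map (Prod.mk ins ∘ (Nat.cast : Nat → Int)) X =
    List.map (fun j : Int => (ins, j)) (do let a ← X; pure (↑a : Int)) := by
  induction X with
  | nil => rfl
  | cons a t ih => simpa using ih

-- B reduces to a filtered range of positions
theorem pv_alt_eq (start pat ins : String) :
    (PySem.List.pyRange 0 (PySem.Str.len start - PySem.Str.len pat + 1) 1).foldl
        (fun acc i =>
          if PySem.Str.slice start (some i) (some (i + PySem.Str.len pat)) == pat
          then acc ++ [(ins, i)] else acc) [] =
      ((List.range' 0 (start.toList.length + 1 - pat.toList.length)).filter
          (fun j => decide (pat.toList <+: start.toList.drop j))).map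
        (fun j => (ins, (j : Int))) := by
  set s := start.toList with hs
  set p := pat.toList with hp
  set M := s.length + 1 - p.length with hM
  have hrange : PySem.List.pyRange 0 (PySem.Str.len start - PySem.Str.len pat + 1) 1 =
      (List.range M).map (Nat.cast : Nat → Int) := by
    rw [PySem.List.pyRange_of_pos 0 _ (by norm_num)]
    simp only [PySem.Str.len_eq, ← hs, ← hp]
    have hif : (if (0:Int) < (s.length : Int) - (p.length : Int) + 1
        then (((s.length : Int) - (p.length : Int) + 1 - 0 + 1 - 1) / 1).toNat else 0) = M := by
      split_ifs with h
      · rw [Int.sub_zero, Int.add_sub_cancel, Int.ediv_one]; omega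
      · omega
    rw [hif]
    apply List.map_congr_left
    intro k _
    omega
  rw [hrange, PySem.List.foldl_append_if, List.filter_map, List.map_map, List.nil_append]
  rw [← List.range_eq_range']
  have hpred : ∀ j ∈ List.range M,
      ((fun i => PySem.Str.slice start (some i) (some (i + PySem.Str.len pat)) == pat) ∘
        (Nat.cast : Nat → Int)) j = decide (p <+: s.drop j) := by
    intro j _
    simp only [Function.comp]
    have hslice : (PySem.Str.slice start (some (j : Int))
        (some ((j : Int) + PySem.Str.len pat))).toList = (s.drop j).take p.length := by
      rw [PySem.Str.toList_slice, PySem.Chars.slice_eq_listSlice, PySem.Str.len_eq]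
      exact PySem.List.slice_natCast_add s j p.length
    rw [Bool.eq_iff_iff, beq_iff_eq, decide_eq_true_iff]
    constructor
    · intro h
      have h2 := congrArg String.toList h
      rw [hslice] at h2
      exact List.prefix_iff_eq_take.mpr h2.symm
    · intro h
      have h2 : (PySem.Str.slice start (some (j : Int))
          (some ((j : Int) + PySem.Str.len pat))).toList = pat.toList := by
        rw [hslice]
        exact (List.prefix_iff_eq_take.mp h).symm
      exact String.toList_inj.mp h2
  rw [List.filter_congr hpred]
  exact pv_map_cast _ ins

-- ===== VERDICT (by name: the statement is the Claim_ definition above) =====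
set_option maxHeartbeats 1000000 in
theorem apply_rule_spec : Claim_equal_apply_rule := by
  intro start rule _hDom hPre
  unfold Spec_apply_rule
  unfold Pre_apply_rule at hPre
  rcases hsp : PySem.Str.split? rule "->" with _ | l
  · rw [hsp] at hPre; simp at hPre
  · rw [hsp] at hPre
    simp only [Option.getD_some] at hPre
    match l with
    | [pattern, insert] =>
      simp only [apply_rule, apply_rule_alt, hsp, Option.getD_some, List.length_cons,
        List.length_nil, List.getElem!_cons_zero, List.getElem!_cons_succ, if_true]
      rw [pv_alt_eq start (PySem.Str.strip pattern) (PySem.Str.strip insert)]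
      have hfind : PySem.Str.find start (PySem.Str.strip pattern) =
          PySem.Chars.findFrom start.toList (PySem.Str.strip pattern).toList ((0 : Nat) : Int) := by
        rw [PySem.Str.find_eq, Nat.cast_zero,
          PySem.Chars.findFrom_zero start.toList (PySem.Str.strip pattern).toList]
      rw [hfind]
      rw [pv_loop_eq start (PySem.Str.strip pattern) (PySem.Str.strip insert)
        (start.toList.length + 2) 0 (by omega) (by omega)]
      simp only [Nat.sub_zero]
    | [] => simp at hPre
    | [_] => simp at hPre
    | _ :: _ :: _ :: _ => simp at hPre
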